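-- pv_equiv track=rewrite | github.com/yskang/AlgorithmPractice | atcoder/python/manhattan.py | solution
-- ===== SOURCE A (Python) =====
-- import bisect
--
-- def solution(p: int, q: int, persons: list):
--     norths = []
--     souths = []
--     easts = []
--     wests = []
--     for x, y, d in persons:
--         if d == 'N':
--             norths.append(y)
--         elif d == 'S':
--             souths.append(y)
--         elif d == 'E':
--             easts.append(x)
--         elif d == 'W':
--             wests.append(x)
--     norths = sorted(norths)
--     souths = sorted(souths)
--
--     ys = set(norths)
--     ys.update(souths)
--     ys = sorted(ys)
--     ys = list(map(lambda k: k+1, ys))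
--
--     max_y_value = -99999
--     max_y = -99999
--     for y in [0] + ys:
--         v = bisect.bisect_left(norths, y)
--         v += (len(souths) - bisect.bisect_right(souths, y))
--         if v > max_y_value:
--             max_y_value = v
--             max_y = y
--
--     wests = sorted(wests)
--     easts = sorted(easts)
--
--     xs = set(wests)
--     xs.update(easts)
--     xs = sorted(xs)
--     xs = list(map(lambda k: k+1, xs))
--
--     max_x_value = -9999
--     max_x = -9999
--     for x in [0] + xs:
--         v = bisect.bisect_left(easts, x)
--         v += (len(wests)-bisect.bisect_right(wests, x))
--         if v > max_x_value:
--             max_x_value = v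
--             max_x = x
--     return '{} {}'.format(max_x, max_y)
-- ===== SOURCE B (Python) =====
-- def solution(p: int, q: int, persons: list):
--     norths = [y for x, y, d in persons if d == 'N']
--     souths = [y for x, y, d in persons if d == 'S']
--     easts = [x for x, y, d in persons if d == 'E']
--     wests = [x for x, y, d in persons if d == 'W']
--
--     def best(low, high):
--         # pick the first threshold t (among 0 and each value+1, ascending)
--         # maximizing #(low below t) + #(high at or above... strictly above t)
--         best_v, best_t = -1, 0
--         for t in [0] + [v + 1 for v in sorted(set(low + high))]:
--             v = sum(1 for a in low if a < t) + sum(1 for a in high if a > t)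
--             if v > best_v:
--                 best_v, best_t = v, t
--         return best_t
--
--     return '{} {}'.format(best(easts, wests), best(norths, souths))
-- ===== Notes on version B (the rewrite author's own statement) =====
-- stated objective: simpler
-- what changed: B drops A's sort-each-group-then-bisect machinery and the duplicated per-axis loops: one shared helper scores each candidate threshold by directly counting the unsorted groups (no sorting of the groups, no binary search).
import Mathlib
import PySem

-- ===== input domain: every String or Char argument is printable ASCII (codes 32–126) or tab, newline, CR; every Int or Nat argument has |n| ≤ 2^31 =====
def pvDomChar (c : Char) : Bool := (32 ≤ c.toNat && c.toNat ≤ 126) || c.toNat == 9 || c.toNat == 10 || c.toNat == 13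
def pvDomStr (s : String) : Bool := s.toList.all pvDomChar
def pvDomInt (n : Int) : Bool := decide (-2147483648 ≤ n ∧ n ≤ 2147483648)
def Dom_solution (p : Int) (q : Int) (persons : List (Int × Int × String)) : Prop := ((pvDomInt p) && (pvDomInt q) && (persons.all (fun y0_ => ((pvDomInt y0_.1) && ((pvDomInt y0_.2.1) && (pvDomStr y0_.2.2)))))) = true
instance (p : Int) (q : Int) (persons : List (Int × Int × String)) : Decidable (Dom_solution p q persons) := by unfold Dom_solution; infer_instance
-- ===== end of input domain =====

-- B replaces A's sort-the-groups-and-bisect scheme with one shared helper that counts each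
-- group directly per candidate threshold (no sorting of the groups, no binary search): simpler.

-- ===== PORT A =====
-- the body of A's `for x, y, d in persons` classification loop
def stepA (st : List Int × List Int × List Int × List Int) (per : Int × Int × String) :
    List Int × List Int × List Int × List Int :=
  if per.2.2 == "N" then (st.1 ++ [per.2.1], st.2.1, st.2.2.1, st.2.2.2)
  else if per.2.2 == "S" then (st.1, st.2.1 ++ [per.2.1], st.2.2.1, st.2.2.2)
  else if per.2.2 == "E" then (st.1, st.2.1, st.2.2.1 ++ [per.1], st.2.2.2)
  else if per.2.2 == "W" then (st.1, st.2.1, st.2.2.1, st.2.2.2 ++ [per.1])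
  else st

-- the body of A's threshold loop: lt = list bisected with bisect_left, rt with bisect_right
def selA (lt rt : List Int) (st : Int × Int) (t : Int) : Int × Int :=
  let v : Int := (PySem.List.bisectLeft lt t : Int) + ((rt.length : Int) - (PySem.List.bisectRight rt t : Int))
  if v > st.1 then (v, t) else st

def solution (p : Int) (q : Int) (persons : List (Int × Int × String)) : String :=
  let grps := persons.foldl stepA ([], [], [], [])
  let norths := PySem.List.sorted grps.1 id
  let souths := PySem.List.sorted grps.2.1 id
  let ys1 := souths.foldl PySem.Set.add (PySem.Set.ofList norths)   -- ys = set(norths); ys.update(souths)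
  let ys := (PySem.List.sorted ys1 id).map (fun k => k + 1)
  let resY := ((0 : Int) :: ys).foldl (selA norths souths) (-99999, -99999)
  let wests := PySem.List.sorted grps.2.2.2 id
  let easts := PySem.List.sorted grps.2.2.1 id
  let xs1 := easts.foldl PySem.Set.add (PySem.Set.ofList wests)
  let xs := (PySem.List.sorted xs1 id).map (fun k => k + 1)
  let resX := ((0 : Int) :: xs).foldl (selA easts wests) (-9999, -9999)
  PySem.Int.toStr resX.2 ++ " " ++ PySem.Int.toStr resY.2   -- '{} {}'.format(max_x, max_y)

-- ===== PORT B =====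
-- the body of B's threshold loop: v counts low-group values below t and high-group values above t
def selB (low high : List Int) (st : Int × Int) (t : Int) : Int × Int :=
  let v : Int := (low.countP (fun a => a < t) : Int) + (high.countP (fun a => t < a) : Int)
  if v > st.1 then (v, t) else st

def bestThresh (low high : List Int) : Int :=
  let cands := (0 : Int) :: (PySem.List.sorted (PySem.Set.ofList (low ++ high)) id).map (fun v => v + 1)
  (cands.foldl (selB low high) (-1, 0)).2

def solution_alt (p : Int) (q : Int) (persons : List (Int × Int × String)) : String :=
  let norths := persons.filterMap (fun per => if per.2.2 == "N" then some per.2.1 else none)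
  let souths := persons.filterMap (fun per => if per.2.2 == "S" then some per.2.1 else none)
  let easts := persons.filterMap (fun per => if per.2.2 == "E" then some per.1 else none)
  let wests := persons.filterMap (fun per => if per.2.2 == "W" then some per.1 else none)
  PySem.Int.toStr (bestThresh easts wests) ++ " " ++ PySem.Int.toStr (bestThresh norths souths)

-- ===== PRECONDITION & SPEC =====
def Spec_solution (p : Int) (q : Int) (persons : List (Int × Int × String)) (out : String) : Prop := out = solution_alt p q persons
instance (p : Int) (q : Int) (persons : List (Int × Int × String)) (out : String) : Decidable (Spec_solution p q persons out) := by unfold Spec_solution; infer_instance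

-- ===== CLAIM (what is proved, stated in full; the proofs are below) =====
def Claim_equal_solution : Prop := ∀ (p : Int) (q : Int) (persons : List (Int × Int × String)), Dom_solution p q persons → Spec_solution p q persons (solution p q persons)

-- ===== LEMMAS AND PROOFS =====

-- A's classification fold equals B's four filterMaps
theorem grps_eq (persons : List (Int × Int × String)) (st : List Int × List Int × List Int × List Int) :
    persons.foldl stepA st =
      (st.1 ++ persons.filterMap (fun per => if per.2.2 == "N" then some per.2.1 else none),
       st.2.1 ++ persons.filterMap (fun per => if per.2.2 == "S" then some per.2.1 else none),
       st.2.2.1 ++ persons.filterMap (fun per => if per.2.2 == "E" then some per.1 else none),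
       st.2.2.2 ++ persons.filterMap (fun per => if per.2.2 == "W" then some per.1 else none)) := by
  induction persons generalizing st with
  | nil => simp
  | cons per rest ih =>
    rw [List.foldl_cons, ih (stepA st per)]
    unfold stepA
    split_ifs with h1 h2 h3 h4 <;> simp_all

-- membership in a Python-set fold of adds
theorem mem_foldl_add (l : List Int) (s : PySem.Set Int) (y : Int) :
    y ∈ l.foldl PySem.Set.add s ↔ y ∈ s ∨ y ∈ l := by
  induction l generalizing s with
  | nil => simp
  | cons a rest ih =>
    simp only [List.foldl_cons, ih, PySem.Set.mem_add, List.mem_cons]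
    tauto

theorem nodup_foldl_add (l : List Int) (s : PySem.Set Int) (hs : s.Nodup) :
    (l.foldl PySem.Set.add s).Nodup := by
  induction l generalizing s with
  | nil => simpa
  | cons a rest ih => exact ih _ (PySem.Set.nodup_add s a hs)

-- A's candidate list (set of the two sorted groups, re-sorted) = B's (set of the concatenation, sorted)
theorem cands_eq (m1 m2 l1 l2 : List Int) (hm : ∀ a : Int, (a ∈ m1 ∨ a ∈ m2) ↔ (a ∈ l1 ∨ a ∈ l2)) :
    PySem.List.sorted ((PySem.List.sorted m2 id).foldl PySem.Set.add (PySem.Set.ofList (PySem.List.sorted m1 id))) id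
      = PySem.List.sorted (PySem.Set.ofList (l1 ++ l2)) id := by
  set S1 := (PySem.List.sorted m2 id).foldl PySem.Set.add (PySem.Set.ofList (PySem.List.sorted m1 id)) with hS1
  set S2 : List Int := PySem.Set.ofList (l1 ++ l2) with hS2
  have hN2 : S2.Nodup := PySem.Set.nodup_ofList _
  have hN1 : S1.Nodup := nodup_foldl_add _ _ (PySem.Set.nodup_ofList _)
  have hmem : ∀ a, a ∈ S1 ↔ a ∈ S2 := by
    intro a
    rw [hS1, hS2, mem_foldl_add, PySem.Set.mem_ofList, PySem.Set.mem_ofList,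
      (PySem.List.sorted_perm m1 id false).mem_iff, (PySem.List.sorted_perm m2 id false).mem_iff,
      List.mem_append]
    exact hm a
  have hperm : S2.Perm S1 := (List.perm_ext_iff_of_nodup hN2 hN1).mpr (fun a => (hmem a).symm)
  have hys : (PySem.List.sorted S2 id).Perm S1 := (PySem.List.sorted_perm S2 id false).trans hperm
  have hnd : (PySem.List.sorted S2 id).Nodup := ((PySem.List.sorted_perm S2 id false).nodup_iff).mpr hN2
  have hle : List.Pairwise (fun a b : Int => a ≤ b) (PySem.List.sorted S2 id) := by
    simpa using PySem.List.sorted_pairwise S2 (id : Int → Int)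
  have hlt : List.Pairwise (fun a b : Int => a < b) (PySem.List.sorted S2 id) :=
    (hle.and hnd).imp (fun h => lt_of_le_of_ne h.1 h.2)
  exact PySem.List.sorted_eq_of_perm_of_pairwise_lt _ _ id hys hlt

-- counting a prefix-closed predicate by its cut point
theorem countP_of_cut (s : List Int) (p : Int → Bool) (k : Nat) (hk : k ≤ s.length)
    (h1 : ∀ j (hj : j < s.length), j < k → p s[j])
    (h2 : ∀ j (hj : j < s.length), k ≤ j → p s[j] = false) :
    s.countP p = k := by
  conv_lhs => rw [← List.take_append_drop k s]
  rw [List.countP_append]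
  have hA : (s.take k).countP p = (s.take k).length := by
    rw [List.countP_eq_length]
    intro a ha
    obtain ⟨j, hj, rfl⟩ := List.mem_take_iff_getElem.mp ha
    exact h1 j (lt_of_lt_of_le (lt_of_lt_of_le hj (min_le_right _ _)) le_rfl)
      (lt_of_lt_of_le hj (min_le_left _ _))
  have hB : (s.drop k).countP p = 0 := by
    rw [List.countP_eq_zero]
    intro a ha
    obtain ⟨j, hj, rfl⟩ := List.mem_drop_iff_getElem.mp ha
    simp [h2 (k + j) (by omega) (by omega)]
  rw [hA, hB, List.length_take]
  omega

-- bisect_left on the sorted copy counts the values strictly below t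
theorem bisectLeft_countP (l : List Int) (t : Int) :
    PySem.List.bisectLeft (PySem.List.sorted l id) t = l.countP (fun a => a < t) := by
  set s := PySem.List.sorted l id with hs
  have hp : List.Pairwise (fun a b : Int => a ≤ b) s := by
    simpa [hs] using PySem.List.sorted_pairwise l (id : Int → Int)
  obtain ⟨hle, h1, h2⟩ := PySem.List.bisectLeft_spec s t hp
  have : s.countP (fun a => a < t) = PySem.List.bisectLeft s t := by
    apply countP_of_cut s _ _ hle
    · intro j hj hjk; simpa using h1 j hj hjk
    · intro j hj hjk; simpa using h2 j hj hjk
  rw [← this, List.Perm.countP_eq _ (PySem.List.sorted_perm l id false)]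

-- bisect_right on the sorted copy counts the values at or below t
theorem bisectRight_countP (l : List Int) (t : Int) :
    PySem.List.bisectRight (PySem.List.sorted l id) t = l.countP (fun a => a ≤ t) := by
  set s := PySem.List.sorted l id with hs
  have hp : List.Pairwise (fun a b : Int => a ≤ b) s := by
    simpa [hs] using PySem.List.sorted_pairwise l (id : Int → Int)
  obtain ⟨hle, h1, h2⟩ := PySem.List.bisectRight_spec s t hp
  have : s.countP (fun a => a ≤ t) = PySem.List.bisectRight s t := by
    apply countP_of_cut s _ _ hle
    · intro j hj hjk; simpa using h1 j hj hjk
    · intro j hj hjk; simpa using not_le.mpr (h2 j hj hjk)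
  rw [← this, List.Perm.countP_eq _ (PySem.List.sorted_perm l id false)]

-- A's per-candidate score equals B's
theorem selA_eq_selB (l1 l2 : List Int) :
    selA (PySem.List.sorted l1 id) (PySem.List.sorted l2 id) = selB l1 l2 := by
  funext st t
  unfold selA selB
  have h1 := bisectLeft_countP l1 t
  have h2 := bisectRight_countP l2 t
  have hlen : (PySem.List.sorted l2 id).length = l2.length :=
    (PySem.List.sorted_perm l2 id false).length_eq
  have hsplit : l2.countP (fun a => a ≤ t) + l2.countP (fun a => t < a) = l2.length := by
    have h := List.length_eq_countP_add_countP (fun a : Int => a ≤ t) (l := l2)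
    have hc : l2.countP (fun a => decide ¬(decide (a ≤ t) = true)) = l2.countP (fun a => t < a) :=
      List.countP_congr (by intro a _; simp)
    rw [hc] at h
    omega
  have hv : (PySem.List.bisectLeft (PySem.List.sorted l1 id) t : Int) +
      (((PySem.List.sorted l2 id).length : Int) - (PySem.List.bisectRight (PySem.List.sorted l2 id) t : Int)) =
      (l1.countP (fun a => a < t) : Int) + (l2.countP (fun a => t < a) : Int) := by
    rw [h1, h2, hlen]
    omega
  rw [hv]

-- both threshold folds select the same pair once the scores agree (negative sentinels are overwritten at t = 0)
theorem fold_sel_eq (low high : List Int) (cs : List Int) (c : Int) (hc : c < 0) :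
    (((0 : Int) :: cs).foldl (selB low high) (c, c)).2 =
    (((0 : Int) :: cs).foldl (selB low high) (-1, 0)).2 := by
  have h0 : ∀ st : Int × Int, st.1 < 0 → selB low high st 0 =
      ((low.countP (fun a => a < 0) : Int) + (high.countP (fun a => (0:Int) < a) : Int), 0) := by
    intro st hst
    unfold selB
    have : (0:Int) ≤ (low.countP (fun a => a < 0) : Int) + (high.countP (fun a => (0:Int) < a) : Int) := by
      positivity
    simp only []
    rw [if_pos (by omega)]
  rw [List.foldl_cons, List.foldl_cons, h0 _ (by omega), h0 _ (by omega)]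

-- the per-axis results agree
theorem axis_eq (m1 m2 l1 l2 : List Int) (c : Int) (hc : c < 0)
    (hm : ∀ a : Int, (a ∈ m1 ∨ a ∈ m2) ↔ (a ∈ l1 ∨ a ∈ l2)) :
    (((0 : Int) :: (PySem.List.sorted ((PySem.List.sorted m2 id).foldl PySem.Set.add
          (PySem.Set.ofList (PySem.List.sorted m1 id))) id).map (fun k => k + 1)).foldl
        (selA (PySem.List.sorted l1 id) (PySem.List.sorted l2 id)) (c, c)).2
      = bestThresh l1 l2 := by
  rw [cands_eq m1 m2 l1 l2 hm, selA_eq_selB l1 l2]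
  unfold bestThresh
  exact fold_sel_eq l1 l2 _ c hc

-- ===== VERDICT (by name: the statement is the Claim_ definition above) =====
theorem solution_spec : Claim_equal_solution := by
  intro p q persons _
  unfold Spec_solution solution solution_alt
  rw [grps_eq persons ([], [], [], [])]
  simp only [List.nil_append]
  rw [axis_eq _ _ _ _ (-99999) (by omega) (fun a => Iff.rfl),
    axis_eq _ _ _ _ (-9999) (by omega) (fun a => or_comm)]
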